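-- pv_equiv track=rewrite | github.com/crobertz/atcoder | ABC/dreamer.py | constructible
-- ===== SOURCE A (Python) =====
-- def constructible(string,testlist):
--   if string == '':
--     return 'YES'
--   else:
--     for word in testlist:
--       if len(word) <= len(string):
--         if string[-len(word):] == word:
--           return constructible(string[:-len(word)],testlist)
--     return 'NO'
-- ===== SOURCE B (Python) =====
-- def constructible(string, testlist):
--     # Iterative greedy: strip the first matching suffix word until the string is empty.
--     while string:
--         for word in testlist:
--             if word and string.endswith(word):
--                 string = string[:-len(word)]
--                 break
--         else:
--             return 'NO'
--     return 'YES'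
-- ===== Notes on version B (the rewrite author's own statement) =====
-- stated objective: idiomatic
-- what changed: Replaced the greedy recursion (recursive call at the first matching suffix inside the scanning for-loop) by an iterative while-loop that repeatedly finds the first matching word with str.endswith and strips it, using for/else for the failure case.
import Mathlib
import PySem

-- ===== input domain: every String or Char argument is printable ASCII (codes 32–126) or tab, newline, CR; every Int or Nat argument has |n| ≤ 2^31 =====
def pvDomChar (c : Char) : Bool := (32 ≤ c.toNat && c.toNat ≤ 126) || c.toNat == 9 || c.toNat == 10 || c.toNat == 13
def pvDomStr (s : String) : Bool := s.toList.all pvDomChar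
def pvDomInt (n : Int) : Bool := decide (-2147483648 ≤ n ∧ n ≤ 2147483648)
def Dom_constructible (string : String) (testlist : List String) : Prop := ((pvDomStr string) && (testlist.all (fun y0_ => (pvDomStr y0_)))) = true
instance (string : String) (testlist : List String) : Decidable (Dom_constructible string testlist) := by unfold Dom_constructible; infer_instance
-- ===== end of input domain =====

-- B replaces A's greedy recursion by an iterative strip-first-matching-suffix loop (same result, constant stack).

-- ===== PORT A =====
-- termination helper for A's recursion: the stripped string is strictly shorter
theorem pvStripSliceLt (s w : List Char) (hs : s ≠ [])
    (h2 : PySem.List.slice s (some (-(w.length : Int))) none = w) :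
    (PySem.List.slice s none (some (-(w.length : Int)))).length < s.length := by
  rcases Nat.eq_zero_or_pos w.length with h0 | hpos
  · exfalso
    rw [List.length_eq_zero_iff] at h0
    subst h0
    simp at h2
    exact hs h2
  · rw [PySem.List.slice_to_neg_natCast s _ hpos]
    have hsl : 0 < s.length := List.length_pos_iff.mpr hs
    simp only [List.length_take]
    omega

mutual
-- literal transliteration of A: empty check, then the for-loop as a scan over the remaining testlist
def constructibleChars (s : List Char) (testlist : List String) : String :=
  if _hs : s = [] then "YES"
  else constructibleScan s _hs testlist testlist
termination_by (s.length, testlist.length + 1)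
decreasing_by
  exact Prod.Lex.right _ (Nat.lt_succ_self _)

def constructibleScan (s : List Char) (hs : s ≠ []) (testlist rest : List String) : String :=
  match rest with
  | [] => "NO"
  | w :: ws =>
    if hc : w.toList.length ≤ s.length ∧
        PySem.List.slice s (some (-(w.toList.length : Int))) none = w.toList then
      constructibleChars (PySem.List.slice s none (some (-(w.toList.length : Int)))) testlist
    else constructibleScan s hs testlist ws
termination_by (s.length, rest.length)
decreasing_by
  · exact Prod.Lex.left _ _ (pvStripSliceLt s w.toList hs hc.2)
  · exact Prod.Lex.right _ (Nat.lt_succ_self _)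
end

def constructible (string : String) (testlist : List String) : String :=
  constructibleChars string.toList testlist

-- ===== PORT B =====
-- termination helper for B's loop: stripping a nonempty suffix word shortens the string
theorem pvTakeStripLt (s : List Char) (w : String) (hs : ¬ s.isEmpty = true)
    (hw : ¬ w.toList.isEmpty = true) (hsf : PySem.Chars.endswith s w.toList = true) :
    (s.take (s.length - w.toList.length)).length < s.length := by
  have hsuf := (PySem.Chars.endswith_iff s w.toList).mp hsf
  have hle := hsuf.length_le
  simp only [List.isEmpty_iff] at hs hw
  have h1 : 0 < w.toList.length := List.length_pos_iff.mpr hw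
  have h2 : 0 < s.length := List.length_pos_iff.mpr hs
  simp only [List.length_take]
  omega

-- the while-loop of B: find the first matching word, strip it, repeat
def constructibleAltChars (s : List Char) (testlist : List String) : String :=
  if _hs : s.isEmpty then "YES"
  else
    match _hf : testlist.find? (fun w => !w.toList.isEmpty && PySem.Chars.endswith s w.toList) with
    | none => "NO"
    | some w => constructibleAltChars (s.take (s.length - w.toList.length)) testlist
termination_by s.length
decreasing_by
  have hp := List.find?_some _hf
  simp only [Bool.and_eq_true, Bool.not_eq_true'] at hp
  exact pvTakeStripLt s w _hs (by simp [hp.1]) hp.2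

def constructible_alt (string : String) (testlist : List String) : String :=
  constructibleAltChars string.toList testlist

-- ===== PRECONDITION & SPEC =====
def Spec_constructible (string : String) (testlist : List String) (out : String) : Prop := out = constructible_alt string testlist
instance (string : String) (testlist : List String) (out : String) : Decidable (Spec_constructible string testlist out) := by unfold Spec_constructible; infer_instance

-- ===== CLAIM (what is proved, stated in full; the proofs are below) =====
def Claim_equal_constructible : Prop := ∀ (string : String) (testlist : List String), Dom_constructible string testlist → Spec_constructible string testlist (constructible string testlist)

-- ===== LEMMAS AND PROOFS =====

-- A's guard (length bound + negative-slice equality) coincides with B's guard (nonempty + endswith) on a nonempty string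
theorem pvCondIff (s : List Char) (w : String) (hs : s ≠ []) :
    (w.toList.length ≤ s.length ∧
      PySem.List.slice s (some (-(w.toList.length : Int))) none = w.toList)
    ↔ (w.toList ≠ [] ∧ w.toList <:+ s) := by
  constructor
  · rintro ⟨hle, hsl⟩
    rcases Nat.eq_zero_or_pos w.toList.length with h0 | hpos
    · exfalso
      rw [List.length_eq_zero_iff] at h0
      rw [h0] at hsl
      simp at hsl
      exact hs hsl
    · refine ⟨by rw [← List.length_pos_iff]; exact hpos, ?_⟩
      rw [PySem.List.slice_from_neg_natCast s _ hpos] at hsl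
      rw [← hsl]
      exact List.drop_suffix _ _
  · rintro ⟨hw, hsf⟩
    have hle := hsf.length_le
    have hpos : 0 < w.toList.length := List.length_pos_iff.mpr hw
    refine ⟨hle, ?_⟩
    rw [PySem.List.slice_from_neg_natCast s _ hpos]
    obtain ⟨t, ht⟩ := hsf
    rw [← ht]
    have : (t ++ w.toList).length - w.toList.length = t.length := by
      simp
    rw [this, List.drop_left]

-- the stripped strings of the two ports coincide when the guard holds
theorem pvStripEq (s : List Char) (w : String) (hpos : 0 < w.toList.length) :
    PySem.List.slice s none (some (-(w.toList.length : Int))) =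
      s.take (s.length - w.toList.length) :=
  PySem.List.slice_to_neg_natCast s _ hpos

-- A's scanning loop computes exactly B's find?-then-strip step
theorem pvScanEq (s : List Char) (hs : s ≠ []) (tl : List String)
    (ih : ∀ s', s'.length < s.length →
      constructibleChars s' tl = constructibleAltChars s' tl) :
    ∀ rest, constructibleScan s hs tl rest =
      match rest.find? (fun w => !w.toList.isEmpty && PySem.Chars.endswith s w.toList) with
      | none => "NO"
      | some w => constructibleAltChars (s.take (s.length - w.toList.length)) tl := by
  intro rest
  induction rest with
  | nil => rw [constructibleScan]; rfl
  | cons w ws ihr =>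
    rw [constructibleScan]
    by_cases hc : w.toList.length ≤ s.length ∧
        PySem.List.slice s (some (-(w.toList.length : Int))) none = w.toList
    · have hb := (pvCondIff s w hs).mp hc
      have hfind : (w :: ws).find?
          (fun w => !w.toList.isEmpty && PySem.Chars.endswith s w.toList) = some w := by
        rw [List.find?_cons_of_pos]
        simp only [Bool.and_eq_true, Bool.not_eq_true']
        exact ⟨by simp [hb.1], (PySem.Chars.endswith_iff s w.toList).mpr hb.2⟩
      rw [hfind]
      simp only [dif_pos hc]
      have hpos : 0 < w.toList.length := List.length_pos_iff.mpr hb.1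
      rw [pvStripEq s w hpos]
      exact ih _ (by
        have := pvStripSliceLt s w.toList hs hc.2
        rwa [pvStripEq s w hpos] at this)
    · have hb : ¬ (w.toList ≠ [] ∧ w.toList <:+ s) := fun h => hc ((pvCondIff s w hs).mpr h)
      have hfind : ((w :: ws).find?
          (fun w => !w.toList.isEmpty && PySem.Chars.endswith s w.toList)) =
          ws.find? (fun w => !w.toList.isEmpty && PySem.Chars.endswith s w.toList) := by
        rw [List.find?_cons_of_neg]
        simp only [Bool.and_eq_true, Bool.not_eq_true', not_and]
        intro h1 h2
        exact hb ⟨by simpa using h1, (PySem.Chars.endswith_iff s w.toList).mp h2⟩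
      rw [hfind]
      simp only [dif_neg hc]
      exact ihr

-- the two cores agree on every string (strong induction on the length)
theorem pvCoreEq (n : Nat) : ∀ (s : List Char) (tl : List String), s.length ≤ n →
    constructibleChars s tl = constructibleAltChars s tl := by
  induction n with
  | zero =>
    intro s tl h
    have hs : s = [] := List.length_eq_zero_iff.mp (Nat.le_zero.mp h)
    subst hs
    rw [constructibleChars, constructibleAltChars]
    simp
  | succ n ih =>
    intro s tl h
    by_cases hs : s = []
    · subst hs
      rw [constructibleChars, constructibleAltChars]
      simp
    · have hAlt : constructibleAltChars s tl =
          match tl.find? (fun w => !w.toList.isEmpty && PySem.Chars.endswith s w.toList) with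
          | none => "NO"
          | some w => constructibleAltChars (s.take (s.length - w.toList.length)) tl := by
        rw [constructibleAltChars, dif_neg (by simpa using hs)]
        cases hfe : tl.find? (fun w => !w.toList.isEmpty && PySem.Chars.endswith s w.toList) <;>
          simp
      rw [constructibleChars, hAlt]
      simp only [dif_neg hs]
      rw [pvScanEq s hs tl (fun s' hlt => ih s' tl (by omega))]

-- ===== VERDICT (by name: the statement is the Claim_ definition above) =====
theorem constructible_spec : Claim_equal_constructible := by
  intro string testlist _
  unfold Spec_constructible constructible constructible_alt
  exact pvCoreEq string.toList.length string.toList testlist le_rfl
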